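-- pv_equiv track=rewrite | github.com/xchem/xchem-align | src/pdbdepo/pdb_deposition.py | append_data_to_values
-- ===== SOURCE A (Python) =====
-- def append_data_to_values(tags1, values1, tags2, values2, ordinal_col):
--     """
--     Append the data is tags/values2 to that in tags/values1, ensuring the order is correct
--     If no value is found then ? is written
--     :param tags1:
--     :param values1:
--     :param tags2:
--     :param values2:
--     :return: A list of lists of the values
--     """
--
--     if ordinal_col:
--         ordinal_idx = tags1.index(ordinal_col)
--     else:
--         ordinal_idx = None
--
--     combined_values = []
--     combined_values.append(values1)
--     n = len(tags2)
--     dicts = []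
--     d = None
--     ordinal_count = len(combined_values)
--     for i, val in enumerate(values2):
--         ordinal_count += 1
--         if i % n == 0:
--             d = {}
--             dicts.append(d)
--         if i % n == ordinal_idx:
--             d[tags2[i % n]] = str(ordinal_count)
--         else:
--             d[tags2[i % n]] = val
--
--     for d in dicts:
--         l = []
--         combined_values.append(l)
--         for tag1 in tags1:
--             if tag1 in d:
--                 l.append(d[tag1])
--             else:
--                 l.append('?')
--
--     return tags1, combined_values
-- ===== SOURCE B (Python) =====
-- def append_data_to_values(tags1, values1, tags2, values2, ordinal_col):
--     """Same result as A, but via one precomputed tag->column map and row slices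
--     instead of building a fresh dict for every row."""
--     if ordinal_col:
--         ordinal_idx = tags1.index(ordinal_col)
--     else:
--         ordinal_idx = None
--
--     n = len(tags2)
--     # last occurrence wins, matching dict overwrite in A
--     colpos_full = {tag: j for j, tag in enumerate(tags2)}
--
--     combined_values = [values1]
--     if values2:
--         for start in range(0, len(values2), n):
--             chunk = values2[start:start + n]
--             if len(chunk) == n:
--                 colpos = colpos_full
--             else:  # final partial row: only the columns actually present
--                 colpos = {tag: j for j, tag in enumerate(tags2[:len(chunk)])}
--             row = []
--             for tag in tags1:
--                 j = colpos.get(tag)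
--                 if j is None:
--                     row.append('?')
--                 elif j == ordinal_idx:
--                     row.append(str(start + j + 2))
--                 else:
--                     row.append(chunk[j])
--             combined_values.append(row)
--     return tags1, combined_values
-- ===== Notes on version B (the rewrite author's own statement) =====
-- stated objective: alternative
-- what changed: Instead of building a fresh dict per row of values2 (A's two-pass dicts list), B precomputes one tag->last-column-position map from tags2 and emits each output row directly from a slice of values2, substituting the ordinal value str(start+j+2) when the tag's column position equals the ordinal index.
import Mathlib
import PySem

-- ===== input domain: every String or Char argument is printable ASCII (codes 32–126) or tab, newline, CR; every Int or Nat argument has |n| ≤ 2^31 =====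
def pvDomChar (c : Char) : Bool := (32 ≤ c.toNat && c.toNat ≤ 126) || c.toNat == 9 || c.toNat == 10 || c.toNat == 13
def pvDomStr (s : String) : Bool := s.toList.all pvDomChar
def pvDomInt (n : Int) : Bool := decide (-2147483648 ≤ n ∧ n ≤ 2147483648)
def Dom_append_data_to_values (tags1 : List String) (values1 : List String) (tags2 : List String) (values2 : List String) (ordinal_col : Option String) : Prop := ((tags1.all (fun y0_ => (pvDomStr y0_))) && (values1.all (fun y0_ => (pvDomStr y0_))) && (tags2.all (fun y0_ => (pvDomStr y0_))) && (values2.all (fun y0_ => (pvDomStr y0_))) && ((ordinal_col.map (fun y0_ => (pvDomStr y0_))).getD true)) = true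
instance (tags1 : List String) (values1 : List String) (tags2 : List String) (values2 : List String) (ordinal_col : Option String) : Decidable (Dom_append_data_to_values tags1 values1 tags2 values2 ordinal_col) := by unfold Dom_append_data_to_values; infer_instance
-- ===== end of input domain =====

-- B replaces A's per-row dict building by one precomputed tag->column map plus row slices (alternative decomposition, same result).

-- ===== PORT A =====

-- 'ordinal_idx = tags1.index(ordinal_col) if ordinal_col else None' ('if ordinal_col' is false for None and "")
def pvAOrdIdx (tags1 : List String) (ordinal_col : Option String) : Option Int :=
  match ordinal_col with
  | some s => if s = "" then none else (PySem.List.index? tags1 s).map (fun k => (k : Int))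
  | none => none

-- the 'for i, val in enumerate(values2)' loop of A: state = (ordinal_count, dicts-in-reverse; head = current d)
-- n = 0 with a nonempty values2 is ZeroDivisionError in Python (i % n), excluded by Pre_.
def pvAFill (tags2 : List String) (n : Int) (oi : Option Int) :
    List String → Int → Int → List (PySem.Dict String String) →
    Int × List (PySem.Dict String String)
  | [], _, cnt, ds => (cnt, ds)
  | val :: rest, i, cnt, ds =>
      let cnt' := cnt + 1
      let m := PySem.Int.mod i n
      let ds' := if m = 0 then PySem.Dict.empty :: ds else ds
      let key := PySem.List.pyGetD tags2 m ""
      let v := if some m = oi then PySem.Int.toStr cnt' else val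
      let ds'' : List (PySem.Dict String String) :=
        match ds' with
        | [] => []
        | d :: t => d.insert key v :: t
      pvAFill tags2 n oi rest (i + 1) cnt' ds''

def append_data_to_values (tags1 : List String) (values1 : List String) (tags2 : List String) (values2 : List String) (ordinal_col : Option String) : List String × List (List String) :=
  let oi := pvAOrdIdx tags1 ordinal_col
  let n : Int := PySem.List.len tags2
  let res := pvAFill tags2 n oi values2 0 1 []
  let dicts := res.2.reverse
  -- second loop: one output row per dict, '?' where the tag is absent
  (tags1, values1 :: dicts.map (fun d =>
    tags1.map (fun t => match d.get? t with | some v => v | none => "?")))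

-- ===== PORT B =====

def pvBOrdIdx (tags1 : List String) (ordinal_col : Option String) : Option Int :=
  match ordinal_col with
  | some s => if s = "" then none else (PySem.List.index? tags1 s).map (fun k => (k : Int))
  | none => none

-- '{tag: j for j, tag in enumerate(tags)}' (later duplicates overwrite)
def pvBColpos (tags : List String) : PySem.Dict String Int :=
  (PySem.List.enumerate tags).foldl (fun d p => d.insert p.2 p.1) PySem.Dict.empty

def append_data_to_values_alt (tags1 : List String) (values1 : List String) (tags2 : List String) (values2 : List String) (ordinal_col : Option String) : List String × List (List String) :=
  let oi := pvBOrdIdx tags1 ordinal_col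
  let n : Int := PySem.List.len tags2
  let colposFull := pvBColpos tags2
  let rows : List (List String) :=
    if values2 = [] then []
    else
      (PySem.List.pyRange 0 (PySem.List.len values2) n).map (fun start =>
        let chunk := PySem.List.slice values2 (some start) (some (start + n))
        let colpos := if PySem.List.len chunk = n then colposFull
                      else pvBColpos (PySem.List.slice tags2 none (some (PySem.List.len chunk)))
        tags1.map (fun tag =>
          match colpos.get? tag with
          | none => "?"
          | some j => if some j = oi then PySem.Int.toStr (start + j + 2)
                      else PySem.List.pyGetD chunk j ""))
  (tags1, values1 :: rows)

-- ===== PRECONDITION & SPEC =====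
-- Pre_ excludes exactly the inputs where the Python A raises: a truthy ordinal_col absent from tags1
-- (ValueError from tags1.index) and a nonempty values2 with empty tags2 (ZeroDivisionError from i % n).
def Pre_append_data_to_values (tags1 : List String) (values1 : List String) (tags2 : List String) (values2 : List String) (ordinal_col : Option String) : Prop :=
  (∀ s ∈ ordinal_col.toList, s ≠ "" → s ∈ tags1) ∧ (values2 ≠ [] → tags2 ≠ [])
instance (tags1 : List String) (values1 : List String) (tags2 : List String) (values2 : List String) (ordinal_col : Option String) : Decidable (Pre_append_data_to_values tags1 values1 tags2 values2 ordinal_col) := by unfold Pre_append_data_to_values; infer_instance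

def pvWitness_append_data_to_values : List String × List String × List String × List String × Option String :=
  (["id", "x"], ["1", "a"], ["x", "id"], ["p", "q", "r"], some "id")

def Spec_append_data_to_values (tags1 : List String) (values1 : List String) (tags2 : List String) (values2 : List String) (ordinal_col : Option String) (out : List String × List (List String)) : Prop := out = append_data_to_values_alt tags1 values1 tags2 values2 ordinal_col
instance (tags1 : List String) (values1 : List String) (tags2 : List String) (values2 : List String) (ordinal_col : Option String) (out : List String × List (List String)) : Decidable (Spec_append_data_to_values tags1 values1 tags2 values2 ordinal_col out) := by unfold Spec_append_data_to_values; infer_instance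

-- ===== CLAIM (what is proved, stated in full; the proofs are below) =====
def Claim_equal_append_data_to_values : Prop := ∀ (tags1 : List String) (values1 : List String) (tags2 : List String) (values2 : List String) (ordinal_col : Option String), Dom_append_data_to_values tags1 values1 tags2 values2 ordinal_col → Pre_append_data_to_values tags1 values1 tags2 values2 ordinal_col → Spec_append_data_to_values tags1 values1 tags2 values2 ordinal_col (append_data_to_values tags1 values1 tags2 values2 ordinal_col)

-- ===== LEMMAS AND PROOFS =====

theorem pvWitness_ok :
    Dom_append_data_to_values pvWitness_append_data_to_values.1 pvWitness_append_data_to_values.2.1 pvWitness_append_data_to_values.2.2.1 pvWitness_append_data_to_values.2.2.2.1 pvWitness_append_data_to_values.2.2.2.2 ∧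
    Pre_append_data_to_values pvWitness_append_data_to_values.1 pvWitness_append_data_to_values.2.1 pvWitness_append_data_to_values.2.2.1 pvWitness_append_data_to_values.2.2.2.1 pvWitness_append_data_to_values.2.2.2.2 := by
  constructor <;> decide

-- the dict A builds for the chunk that starts at global index s
def pvChunkDict (tags2 : List String) (oi : Option Int) (s : Int) (chunk : List String) : PySem.Dict String String :=
  (PySem.List.enumerate chunk).foldl
    (fun d p => d.insert (PySem.List.pyGetD tags2 p.1 "")
      (if some p.1 = oi then PySem.Int.toStr (s + p.1 + 2) else p.2)) PySem.Dict.empty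

-- the list of chunk dicts A's first loop produces for the remaining values v, starting at index s
def pvChunkDicts (tags2 : List String) (n : Nat) (oi : Option Int) : List String → Int → List (PySem.Dict String String)
  | [], _ => []
  | x :: v, s => pvChunkDict tags2 oi s ((x :: v).take n) :: pvChunkDicts tags2 n oi (v.drop (n - 1)) (s + n)
termination_by l _ => l.length
decreasing_by simp

-- A's output row for one chunk dict
def pvARow (tags1 : List String) (d : PySem.Dict String String) : List String :=
  tags1.map (fun t => match d.get? t with | some v => v | none => "?")

-- B's output row for the chunk at a given start (exactly the lambda inside append_data_to_values_alt)
def pvBRow (tags1 tags2 values2 : List String) (oi : Option Int) (n : Int) (start : Int) : List String :=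
  let chunk := PySem.List.slice values2 (some start) (some (start + n))
  let colpos := if PySem.List.len chunk = n then pvBColpos tags2
                else pvBColpos (PySem.List.slice tags2 none (some (PySem.List.len chunk)))
  tags1.map (fun tag =>
    match colpos.get? tag with
    | none => "?"
    | some j => if some j = oi then PySem.Int.toStr (start + j + 2)
                else PySem.List.pyGetD chunk j "")

-- range with a positive step: nil and cons forms
theorem pvPyRange_pos_nil (a b s : Int) (hs : 0 < s) (hb : b <= a) : PySem.List.pyRange a b s = [] := by
  rw [PySem.List.pyRange_of_pos a b hs, if_neg (not_lt.2 hb)]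
  simp

theorem pvPyRange_pos_cons (a b s : Int) (hs : 0 < s) (h : a < b) :
    PySem.List.pyRange a b s = a :: PySem.List.pyRange (a + s) b s := by
  rw [PySem.List.pyRange_of_pos a b hs, PySem.List.pyRange_of_pos (a + s) b hs]
  by_cases h2 : a + s < b
  · rw [if_pos h, if_pos h2]
    have key : b - a + s - 1 = (b - (a + s) + s - 1) + 1 * s := by ring
    rw [key, Int.add_mul_ediv_right _ _ (ne_of_gt hs)]
    have hd0 : 0 <= (b - (a + s) + s - 1) / s := by
      apply Int.ediv_nonneg _ (le_of_lt hs); omega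
    have h3 : ((b - (a + s) + s - 1) / s + 1).toNat = ((b - (a + s) + s - 1) / s).toNat + 1 := by omega
    rw [h3, List.range_succ_eq_map, List.map_cons, List.map_map]
    refine List.cons_eq_cons.mpr ⟨by simp, ?_⟩
    apply List.map_congr_left
    intro k _
    simp [Nat.succ_eq_add_one]
    ring
  · rw [if_pos h, if_neg h2]
    have h1 : (1 : Int) <= (b - a + s - 1) / s := by
      rw [Int.le_ediv_iff_mul_le hs]; omega
    have h2' : (b - a + s - 1) / s < 2 := by
      rw [Int.ediv_lt_iff_lt_mul hs]; omega
    have h3 : ((b - a + s - 1) / s).toNat = 1 := by omega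
    rw [h3]
    simp

theorem pvInner (tags2 : List String) (oi : Option Int) (c rest : List String) (j s : Nat)
    (d : PySem.Dict String String) (ds : List (PySem.Dict String String))
    (hj : 1 ≤ j) (hc : j + c.length ≤ tags2.length) (hdvd : tags2.length ∣ s) :
    pvAFill tags2 (tags2.length : Int) oi (c ++ rest) ((s : Int) + j) ((s : Int) + j + 1) (d :: ds) =
    pvAFill tags2 (tags2.length : Int) oi rest ((s : Int) + j + c.length) ((s : Int) + j + c.length + 1)
      (((PySem.List.enumerate c (j : Int)).foldl
        (fun d p => d.insert (PySem.List.pyGetD tags2 p.1 "")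
          (if some p.1 = oi then PySem.Int.toStr ((s : Int) + p.1 + 2) else p.2)) d) :: ds) := by
  induction c generalizing j d with
  | nil => simp [PySem.List.enumerate_nil]
  | cons x c' ih =>
      obtain ⟨q, hq⟩ := hdvd
      have hn : 0 < tags2.length := by simp at hc; omega
      have hm : PySem.Int.mod ((s : Int) + j) (tags2.length : Int) = (j : Int) := by
        rw [PySem.Int.mod_eq_emod_of_pos (by exact_mod_cast hn)]
        have : (s : Int) + j = (j : Int) + (tags2.length : Int) * (q : Int) := by
          subst hq; push_cast; ring
        rw [this, Int.add_mul_emod_self_left, Int.emod_eq_of_lt (by positivity) (by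
          simp at hc; exact_mod_cast (by omega : j < tags2.length))]
      rw [List.cons_append]
      rw [pvAFill]
      simp only [hm]
      rw [if_neg (by exact_mod_cast (by omega : ¬ j = 0))]
      rw [PySem.List.enumerate_cons, List.foldl_cons]
      have := ih (j + 1)
        (d.insert (PySem.List.pyGetD tags2 (j : Int) "")
          (if some (j : Int) = oi then PySem.Int.toStr ((s : Int) + j + 1 + 1) else x))
        (by omega) (by simp at hc ⊢; omega)
      simp only [List.length_cons]
      push_cast at this ⊢
      ring_nf at this ⊢
      exact this

theorem pvChunkDicts_nil (tags2 : List String) (n : Nat) (oi : Option Int) (s : Int) :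
    pvChunkDicts tags2 n oi [] s = [] := by
  simp only [pvChunkDicts]

theorem pvChunkDicts_cons (tags2 : List String) (n : Nat) (oi : Option Int) (x : String) (v : List String) (s : Int) :
    pvChunkDicts tags2 n oi (x :: v) s =
    pvChunkDict tags2 oi s ((x :: v).take n) :: pvChunkDicts tags2 n oi (v.drop (n - 1)) (s + n) := by
  simp only [pvChunkDicts]

theorem pvFillAux (tags2 : List String) (oi : Option Int) (hn : tags2 ≠ []) (N : Nat) :
    ∀ (v : List String), v.length ≤ N → ∀ (s : Nat) (ds : List (PySem.Dict String String)),
    tags2.length ∣ s →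
    pvAFill tags2 (tags2.length : Int) oi v (s : Int) ((s : Int) + 1) ds =
    (((s : Int) + v.length + 1), (pvChunkDicts tags2 tags2.length oi v (s : Int)).reverse ++ ds) := by
  induction N with
  | zero =>
      intro v hv s ds hdvd
      have : v = [] := List.length_eq_zero_iff.mp (by omega)
      subst this
      simp [pvAFill, pvChunkDicts_nil]
  | succ N ih =>
      intro v hv s ds hdvd
      match v with
      | [] => simp [pvAFill, pvChunkDicts_nil]
      | x :: v' =>
        have hnl : 1 ≤ tags2.length := by cases tags2 <;> simp_all
        have hm0 : PySem.Int.mod (s : Int) (tags2.length : Int) = 0 := by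
          rw [PySem.Int.mod_eq_emod_of_pos (by exact_mod_cast hnl)]
          obtain ⟨q, hq⟩ := hdvd; subst hq; push_cast; simp [Int.mul_emod_right]
        rw [pvAFill]
        simp only [hm0]
        set d1 : PySem.Dict String String :=
          PySem.Dict.empty.insert (PySem.List.pyGetD tags2 (0 : Int) "")
            (if some (0 : Int) = oi then PySem.Int.toStr ((s : Int) + 1 + 1) else x) with hd1
        have hsplit : v' = v'.take (tags2.length - 1) ++ v'.drop (tags2.length - 1) :=
          (List.take_append_drop _ _).symm
        have hinner := pvInner tags2 oi (v'.take (tags2.length - 1)) (v'.drop (tags2.length - 1))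
          1 s d1 ds (le_refl 1) (by simp; omega) hdvd
        push_cast at hinner
        show pvAFill tags2 (tags2.length : Int) oi v' ((s : Int) + 1) ((s : Int) + 1 + 1) (d1 :: ds) =
          ((s : Int) + ((x :: v').length : Int) + 1,
            (pvChunkDicts tags2 tags2.length oi (x :: v') (s : Int)).reverse ++ ds)
        conv_lhs => rw [hsplit]
        rw [hinner, pvChunkDicts_cons]
        have hfold : (List.foldl
            (fun d p => d.insert (PySem.List.pyGetD tags2 p.1 "")
              (if some p.1 = oi then PySem.Int.toStr ((s : Int) + p.1 + 2) else p.2))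
            d1 (PySem.List.enumerate (List.take (tags2.length - 1) v') 1)) =
            pvChunkDict tags2 oi (s : Int) ((x :: v').take tags2.length) := by
          conv_rhs => rw [show tags2.length = (tags2.length - 1) + 1 by omega]
          rw [List.take_succ_cons]
          simp [pvChunkDict, PySem.List.enumerate_cons, hd1]
          rw [show ((s : Int) + 1 + 1) = (s : Int) + 2 by ring]
        by_cases hrest : v'.drop (tags2.length - 1) = []
        · rw [hrest, pvAFill]
          have ht : (List.take (tags2.length - 1) v').length = v'.length := by
            have := List.drop_eq_nil_iff.mp hrest
            simp [List.length_take]; omega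
          rw [pvChunkDicts_nil]
          refine Prod.ext ?_ ?_
          · simp [ht]; ring
          · simp [hfold]
        · have hlen : tags2.length - 1 ≤ v'.length := by
            by_contra hco
            exact hrest (List.drop_eq_nil_iff.mpr (by omega))
          have ht : (List.take (tags2.length - 1) v').length = tags2.length - 1 := by
            simp [List.length_take]; omega
          have e1 : ((s : Int) + 1 + ((List.take (tags2.length - 1) v').length : Int)) = ((s + tags2.length : Nat) : Int) := by
            rw [ht]; push_cast; omega
          rw [e1]
          rw [ih (v'.drop (tags2.length - 1)) (by simp at hv ⊢; omega) (s + tags2.length)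
            (List.foldl
              (fun d p => d.insert (PySem.List.pyGetD tags2 p.1 "")
                (if some p.1 = oi then PySem.Int.toStr ((s : Int) + p.1 + 2) else p.2))
              d1 (PySem.List.enumerate (List.take (tags2.length - 1) v') 1) :: ds)
            (Nat.dvd_add hdvd (dvd_refl _))]
          refine Prod.ext ?_ ?_
          · simp [List.length_drop]; omega
          · simp [hfold, List.reverse_cons]
        

theorem pvCore (js : List Int) (k : Int → String) (f : Int → String)
    (dA : PySem.Dict String String) (dB : PySem.Dict String Int)
    (h : ∀ t, dA.get? t = (dB.get? t).map f) (t : String) :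
    ((js.foldl (fun d j => d.insert (k j) (f j)) dA).get? t) =
    ((js.foldl (fun d j => d.insert (k j) j) dB).get? t).map f := by
  induction js generalizing dA dB with
  | nil => exact h t
  | cons j js ih =>
      refine ih _ _ (fun t => ?_)
      rw [PySem.Dict.get?_insert, PySem.Dict.get?_insert]
      split
      · rfl
      · exact h t

theorem pvRow (tags1 tags2 : List String) (oi : Option Int) (c : List String)
    (s : Nat) (hc : c.length ≤ tags2.length) :
    tags1.map (fun t => match (pvChunkDict tags2 oi (s : Int) c).get? t with | some v => v | none => "?") =
    tags1.map (fun tag =>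
      match (if (c.length : Int) = (tags2.length : Int) then pvBColpos tags2 else pvBColpos (tags2.take c.length)).get? tag with
      | none => "?"
      | some j => if some j = oi then PySem.Int.toStr ((s : Int) + j + 2)
                  else PySem.List.pyGetD c j "") := by
  apply List.map_congr_left
  intro t _
  have hA : pvChunkDict tags2 oi (s : Int) c =
      (PySem.List.pyRange 0 (c.length : Int)).foldl
        (fun d j => d.insert (PySem.List.pyGetD tags2 j "")
          (if some j = oi then PySem.Int.toStr ((s : Int) + j + 2) else PySem.List.pyGetD c j "")) PySem.Dict.empty := by
    rw [pvChunkDict, PySem.List.enumerate_eq_map_pyRange c "", List.foldl_map]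
    simp [PySem.List.len_eq]
  have hB : (if (c.length : Int) = (tags2.length : Int) then pvBColpos tags2 else pvBColpos (tags2.take c.length)) =
      (PySem.List.pyRange 0 (c.length : Int)).foldl
        (fun d j => d.insert (PySem.List.pyGetD tags2 j "") j) PySem.Dict.empty := by
    split
    · next heq =>
        have : c.length = tags2.length := by exact_mod_cast heq
        rw [pvBColpos, PySem.List.enumerate_eq_map_pyRange tags2 "", List.foldl_map]
        simp [PySem.List.len_eq, this]
    · rw [pvBColpos, PySem.List.enumerate_eq_map_pyRange (tags2.take c.length) "", List.foldl_map]
      simp only [PySem.List.len_eq, List.length_take, Nat.min_eq_left hc]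
      apply PySem.List.foldl_congr_mem
      intro acc j hj
      have hj' := PySem.List.mem_pyRange_one.mp hj
      have hjl : j < (c.length : Int) := hj'.2
      congr 1
      rw [PySem.List.pyGetD_eq_getElem _ _ hj'.1 (by simp [Nat.min_eq_left hc]; omega),
          PySem.List.pyGetD_eq_getElem _ _ hj'.1 (by omega)]
      exact List.getElem_take
  rw [hA, hB, pvCore (PySem.List.pyRange 0 (c.length : Int))
    (fun j => PySem.List.pyGetD tags2 j "")
    (fun j => if some j = oi then PySem.Int.toStr ((s : Int) + j + 2) else PySem.List.pyGetD c j "")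
    PySem.Dict.empty PySem.Dict.empty
    (fun t => by simp [PySem.Dict.get?_empty]) t]
  cases ((PySem.List.pyRange 0 (c.length : Int)).foldl
        (fun d j => d.insert (PySem.List.pyGetD tags2 j "") j) PySem.Dict.empty).get? t <;> rfl

theorem pvRows (tags1 tags2 values2 : List String) (oi : Option Int) (hn : tags2 ≠ []) (N : Nat) :
    ∀ (v : List String), v.length ≤ N → ∀ (s : Nat), v = values2.drop s →
    (pvChunkDicts tags2 tags2.length oi v (s : Int)).map (pvARow tags1) =
    (PySem.List.pyRange (s : Int) (values2.length : Int) (tags2.length : Int)).map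
      (pvBRow tags1 tags2 values2 oi (tags2.length : Int)) := by
  have hnl : 1 ≤ tags2.length := by cases tags2 <;> simp_all
  induction N with
  | zero =>
      intro v hv s hdrop
      have hve : v = [] := List.length_eq_zero_iff.mp (by omega)
      subst hve
      rw [pvChunkDicts_nil, pvPyRange_pos_nil _ _ _ (by exact_mod_cast hnl)
        (by have := List.drop_eq_nil_iff.mp hdrop.symm; exact_mod_cast this)]
      simp
  | succ N ih =>
      intro v hv s hdrop
      match v with
      | [] =>
          rw [pvChunkDicts_nil, pvPyRange_pos_nil _ _ _ (by exact_mod_cast hnl)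
            (by have := List.drop_eq_nil_iff.mp hdrop.symm; exact_mod_cast this)]
          simp
      | x :: v' =>
          have hs : s < values2.length := by
            by_contra hco
            have : values2.drop s = [] := List.drop_eq_nil_iff.mpr (by omega)
            rw [← hdrop] at this
            simp at this
          rw [pvChunkDicts_cons, List.map_cons,
            pvPyRange_pos_cons _ _ _ (by exact_mod_cast hnl) (by exact_mod_cast hs), List.map_cons]
          have hchunk : PySem.List.slice values2 (some (s : Int)) (some ((s : Int) + (tags2.length : Int))) =
              (x :: v').take tags2.length := by
            rw [show ((s : Int) + (tags2.length : Int)) = ((s : Int) + ((tags2.length : Nat) : Int)) by ring]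
            rw [PySem.List.slice_natCast_add values2 s tags2.length, ← hdrop]
          refine List.cons_eq_cons.mpr ⟨?_, ?_⟩
          · rw [pvBRow]
            simp only [hchunk, PySem.List.len_eq]
            rw [show (some ((((x :: v').take tags2.length).length : Nat) : Int)) =
                  (some ((((x :: v').take tags2.length).length : Nat) : Int)) from rfl]
            rw [PySem.List.slice_to_natCast]
            exact pvRow tags1 tags2 oi ((x :: v').take tags2.length) s (by simp)
          · rw [show ((s : Int) + (tags2.length : Int)) = (((s + tags2.length : Nat)) : Int) by push_cast; ring]
            refine ih (v'.drop (tags2.length - 1)) (by simp at hv ⊢; omega) (s + tags2.length) ?_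
            have : v'.drop (tags2.length - 1) = (x :: v').drop tags2.length := by
              conv_rhs => rw [show tags2.length = (tags2.length - 1) + 1 by omega]
              rw [List.drop_succ_cons]
            rw [this, hdrop, List.drop_drop]

-- ===== VERDICT (by name: the statement is the Claim_ definition above) =====
theorem append_data_to_values_spec : Claim_equal_append_data_to_values := by
  intro tags1 values1 tags2 values2 ordinal_col _ hpre
  unfold Spec_append_data_to_values
  have hBalt : append_data_to_values_alt tags1 values1 tags2 values2 ordinal_col =
      (tags1, values1 :: (if values2 = [] then [] else
        (PySem.List.pyRange 0 (PySem.List.len values2) (PySem.List.len tags2)).map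
          (pvBRow tags1 tags2 values2 (pvBOrdIdx tags1 ordinal_col) (PySem.List.len tags2)))) := rfl
  rw [hBalt]
  by_cases hv2 : values2 = []
  · subst hv2
    simp [append_data_to_values, pvAFill]
  · have htg2 : tags2 ≠ [] := hpre.2 hv2
    have hfill := pvFillAux tags2 (pvAOrdIdx tags1 ordinal_col) htg2 values2.length values2
      (le_refl _) 0 [] (dvd_zero _)
    have hrows := pvRows tags1 tags2 values2 (pvAOrdIdx tags1 ordinal_col) htg2 values2.length
      values2 (le_refl _) 0 (by simp)
    rw [if_neg hv2]
    show (tags1, values1 :: (pvAFill tags2 (PySem.List.len tags2) (pvAOrdIdx tags1 ordinal_col)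
        values2 0 1 []).2.reverse.map (pvARow tags1)) = _
    norm_num at hfill
    simp only [PySem.List.len_eq, hfill]
    rw [show pvBOrdIdx tags1 ordinal_col = pvAOrdIdx tags1 ordinal_col from rfl]
    norm_num at hrows
    rw [List.reverse_reverse, hrows]
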